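-- pv_equiv track=rewrite | github.com/CcydtN/CTF_Writeups | 2024/LA_CTF/misc/one_by_one/solve.py | process
-- ===== SOURCE A (Python) =====
-- def process(entry):
--     freq = {}
--     for key, value in entry["options"].items():
--         if value not in freq:
--             freq.update({value:[]})
--         freq[value].append(key)
--
--     filtered = filter(lambda x: len(x)==1, freq.values())
--     mapped = map(lambda x: x[0], filtered)
--     ret = list(mapped)
--     return ret[0] if len(ret) != 0 else None
-- ===== SOURCE B (Python) =====
-- def process(entry):
--     items = list(entry["options"].items())
--     values = [v for _, v in items]
--     for i, (k, v) in enumerate(items):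
--         if v not in values[:i] and v not in values[i + 1:]:
--             return k
--     return None
-- ===== Notes on version B (the rewrite author's own statement) =====
-- stated objective: alternative
-- what changed: B builds no frequency dict at all: it materialises the value list once and, scanning the original items with enumerate, returns the first key whose value occurs neither in the slice before it nor in the slice after it (positional uniqueness test instead of A's value->keys grouping plus filter/map).
-- outside the precondition, e.g. on process({'notoptions': {}}): A raises KeyError, B raises KeyError
import Mathlib
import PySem

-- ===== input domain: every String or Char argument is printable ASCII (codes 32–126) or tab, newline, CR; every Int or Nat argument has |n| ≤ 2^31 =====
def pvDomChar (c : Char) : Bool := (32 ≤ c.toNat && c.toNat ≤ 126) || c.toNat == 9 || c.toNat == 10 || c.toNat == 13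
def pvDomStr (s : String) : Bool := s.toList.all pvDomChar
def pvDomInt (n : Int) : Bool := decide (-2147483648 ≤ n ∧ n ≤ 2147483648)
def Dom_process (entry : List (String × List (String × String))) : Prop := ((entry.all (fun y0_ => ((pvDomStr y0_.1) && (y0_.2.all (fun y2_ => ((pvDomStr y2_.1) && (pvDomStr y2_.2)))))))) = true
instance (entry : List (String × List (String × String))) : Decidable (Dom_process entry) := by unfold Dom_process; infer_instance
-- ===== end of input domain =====

-- B builds no frequency structure: it scans the original options items with enumerate and
-- returns the first key whose value occurs in neither the slice before nor after its position
-- (objective: alternative).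

-- ===== PORT A =====
def process (entry : List (String × List (String × String))) : Option String :=
  match (PySem.Dict.ofList entry).get? "options" with
  | none => none  -- Python raises KeyError here; excluded by Pre_process
  | some opts =>
    let options := PySem.Dict.ofList opts
    let freq := options.items.foldl
      (fun freq kv =>
        let freq1 := if freq.contains kv.2 then freq else freq.insert kv.2 ([] : List String)
        freq1.modify kv.2 [] (fun xs => xs ++ [kv.1]))
      PySem.Dict.empty
    -- x[0] is taken on lists the filter guarantees non-empty, so headI is exact here
    let ret := (freq.values.filter (fun x => x.length == 1)).map (fun x => x.headI)
    match ret with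
    | [] => none
    | r :: _ => some r

-- ===== PORT B =====
def findB (values : List String) : List (Int × (String × String)) → Option String
  | [] => none
  | (i, kv) :: rest =>
    if !(PySem.List.slice values none (some i)).contains kv.2
        && !(PySem.List.slice values (some (i + 1)) none).contains kv.2
    then some kv.1 else findB values rest

def process_alt (entry : List (String × List (String × String))) : Option String :=
  match (PySem.Dict.ofList entry).get? "options" with
  | none => none  -- Python raises KeyError here; excluded by Pre_process
  | some opts =>
    let items := (PySem.Dict.ofList opts).items
    let values := items.map Prod.snd
    findB values (PySem.List.enumerate items 0)

-- ===== PRECONDITION & SPEC =====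
-- Pre_ excludes exactly the inputs without an "options" key, on which Python A raises KeyError.
def Pre_process (entry : List (String × List (String × String))) : Prop :=
  "options" ∈ entry.map Prod.fst
instance (entry : List (String × List (String × String))) : Decidable (Pre_process entry) := by unfold Pre_process; infer_instance
def pvWitness_process : (List (String × List (String × String))) :=
  [("options", [("a", "x"), ("b", "y"), ("c", "x")])]

def Spec_process (entry : List (String × List (String × String))) (out : Option String) : Prop := out = process_alt entry
instance (entry : List (String × List (String × String))) (out : Option String) : Decidable (Spec_process entry out) := by unfold Spec_process; infer_instance

-- ===== CLAIM (what is proved, stated in full; the proofs are below) =====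
def Claim_equal_process : Prop := ∀ (entry : List (String × List (String × String))), Dom_process entry → Pre_process entry → Spec_process entry (process entry)

-- ===== LEMMAS AND PROOFS =====

-- A's conditional-insert-then-append step is the plain modify step
theorem stepA_eq (d : PySem.Dict String (List String)) (kv : String × String) :
    (let d1 := if d.contains kv.2 then d else d.insert kv.2 ([] : List String)
     d1.modify kv.2 [] (fun xs => xs ++ [kv.1]))
    = d.modify kv.2 [] (fun xs => xs ++ [kv.1]) := by
  by_cases h : d.contains kv.2
  · simp [h]
  · have h' : d.contains kv.2 = false := by simpa using h
    simp [h', PySem.Dict.modify, PySem.Dict.insert_insert_self,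
      PySem.Dict.getD_insert_self, PySem.Dict.getD_of_not_contains d ([]:List String) h']

-- PySem.Set.ofList keeps first occurrences
theorem ofList_cons (x : String) (xs : List String) :
    PySem.Set.ofList (x :: xs) = x :: (PySem.Set.ofList xs).filter (fun y => !(y == x)) := by
  have h1 : (x :: xs) = [x] ++ xs := rfl
  rw [h1, PySem.Set.ofList_append, PySem.Set.update_eq_append_filter]
  have h2 : PySem.Set.ofList [x] = [x] := rfl
  rw [h2]
  simp only [List.cons_append, List.nil_append, List.cons.injEq, true_and]
  apply List.filter_congr
  intro y _
  simp only [PySem.Set.contains, List.contains_cons, List.contains_nil, Bool.or_false]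

-- first-occurrence dedup does not change a filter that keeps only count-≤1 elements
theorem ofList_filter_count (xs : List String) (p : String → Bool)
    (h : ∀ c, p c = true → List.count c xs ≤ 1) :
    (PySem.Set.ofList xs).filter p = xs.filter p := by
  induction xs with
  | nil => rfl
  | cons x xs ih =>
    have hxs : ∀ c, p c = true → List.count c xs ≤ 1 := by
      intro c hc
      have := h c hc
      have hle : List.count c xs ≤ List.count c (x :: xs) := by
        rw [List.count_cons]; omega
      omega
    rw [ofList_cons]
    cases hp : p x with
    | false =>
      rw [List.filter_cons_of_neg (by simp [hp]), List.filter_cons_of_neg (by simp [hp])]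
      rw [List.filter_filter, ← ih hxs]
      apply List.filter_congr
      intro y _
      cases hpy : p y with
      | false => simp
      | true =>
        have hyx : y ≠ x := by
          intro he; rw [he] at hpy; simp [hp] at hpy
        simp [hyx]
    | true =>
      have hcount : List.count x xs = 0 := by
        have := h x hp
        rw [List.count_cons_self] at this
        omega
      have hxmem : x ∉ xs := by
        exact List.count_eq_zero.mp hcount
      have hfe : (PySem.Set.ofList xs).filter (fun y => !(y == x)) = PySem.Set.ofList xs := by
        apply List.filter_eq_self.mpr
        intro y hy
        have : y ∈ xs := (PySem.Set.mem_ofList _ _).mp hy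
        simp; intro he; rw [he] at this; exact hxmem this
      rw [hfe, List.filter_cons_of_pos (by simp [hp]), List.filter_cons_of_pos (by simp [hp]),
        ih hxs]

-- characterisation of A's grouping fold
theorem freq_swap (l : List (String × String)) :
    l.foldl (fun (d : PySem.Dict String (List String)) kv =>
        d.modify kv.2 [] (fun xs => xs ++ [kv.1])) PySem.Dict.empty
    = (l.map Prod.swap).foldl (fun d q => d.modify q.1 [] (fun xs => xs ++ [q.2]))
        PySem.Dict.empty := by
  rw [List.foldl_map]
  rfl

theorem freq_getD (l : List (String × String)) (c : String) :
    (l.foldl (fun (d : PySem.Dict String (List String)) kv =>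
        d.modify kv.2 [] (fun xs => xs ++ [kv.1])) PySem.Dict.empty).getD c []
    = (l.filter (fun p => p.2 == c)).map Prod.fst := by
  rw [freq_swap, PySem.Dict.getD_foldl_modify_append, List.filter_map]
  simp [Function.comp_def]

theorem freq_keys (l : List (String × String)) :
    (l.foldl (fun (d : PySem.Dict String (List String)) kv =>
        d.modify kv.2 [] (fun xs => xs ++ [kv.1])) PySem.Dict.empty).keys
    = PySem.Set.ofList (l.map Prod.snd) := by
  rw [freq_swap,
    PySem.Dict.keys_foldl_modify_key (l.map Prod.swap) Prod.fst []
      (fun _ q => fun xs => xs ++ [q.2]) PySem.Dict.empty]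
  simp [PySem.Set.update_nil_left, List.map_map, Function.comp_def]

theorem freq_nodup (l : List (String × String)) :
    (l.foldl (fun (d : PySem.Dict String (List String)) kv =>
        d.modify kv.2 [] (fun xs => xs ++ [kv.1])) PySem.Dict.empty).keys.Nodup := by
  rw [freq_swap]
  exact PySem.Dict.nodup_keys_foldl_modify_key _ _ _ _ _ (by simp)

-- A's match expression over an arbitrary items list equals 'first key with unique value'
theorem coreA (l : List (String × String)) :
    (match ((l.foldl
        (fun freq kv =>
          let freq1 := if freq.contains kv.2 then freq else freq.insert kv.2 ([] : List String)
          freq1.modify kv.2 [] (fun xs => xs ++ [kv.1]))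
        PySem.Dict.empty).values.filter (fun x => x.length == 1)).map (fun x => x.headI) with
     | [] => none
     | r :: _ => some r)
    = (l.find? (fun kv => List.count kv.2 (l.map Prod.snd) == 1)).map Prod.fst := by
  have hstep : (fun (freq : PySem.Dict String (List String)) (kv : String × String) =>
      let freq1 := if freq.contains kv.2 then freq else freq.insert kv.2 ([] : List String)
      freq1.modify kv.2 [] (fun xs => xs ++ [kv.1]))
      = fun freq kv => freq.modify kv.2 [] (fun xs => xs ++ [kv.1]) := by
    funext d kv; exact stepA_eq d kv
  rw [hstep]
  have hlen : ∀ c, ((l.filter (fun p => p.2 == c)).map Prod.fst).length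
      = List.count c (l.map Prod.snd) := by
    intro c
    rw [List.length_map, List.count_eq_countP, List.countP_map, List.countP_eq_length_filter]
    rfl
  rw [PySem.Dict.values_eq_map_keys _ (freq_nodup l) [], freq_keys l, List.filter_map]
  have hfp : ((PySem.Set.ofList (l.map Prod.snd)).filter
        ((fun x => x.length == 1) ∘ fun k =>
          (l.foldl (fun (d : PySem.Dict String (List String)) kv =>
            d.modify kv.2 [] (fun xs => xs ++ [kv.1])) PySem.Dict.empty).getD k []))
      = (l.map Prod.snd).filter (fun c => List.count c (l.map Prod.snd) == 1) := by
    have h1 : ((fun (x : List String) => x.length == 1) ∘ fun k =>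
          (l.foldl (fun (d : PySem.Dict String (List String)) kv =>
            d.modify kv.2 [] (fun xs => xs ++ [kv.1])) PySem.Dict.empty).getD k [])
        = fun c => List.count c (l.map Prod.snd) == 1 := by
      funext c; simp only [Function.comp_def, freq_getD l c, hlen c]
    rw [h1]
    apply ofList_filter_count
    intro c hc
    simp only [beq_iff_eq] at hc
    omega
  rw [hfp, List.filter_map]
  have hmatch : ∀ (ys : List String),
      (match ys with | [] => none | r :: _ => some r) = ys.head? := by
    intro ys; cases ys <;> rfl
  rw [hmatch]
  rw [List.map_map, List.map_map, List.head?_map, List.head?_filter]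
  have hpp : ((fun c => List.count c (l.map Prod.snd) == 1) ∘ Prod.snd)
      = fun (kv : String × String) => List.count kv.2 (l.map Prod.snd) == 1 := rfl
  rw [hpp]
  cases hfind : l.find? (fun kv => List.count kv.2 (l.map Prod.snd) == 1) with
  | none => rfl
  | some p0 =>
    simp only [Option.map_some]
    congr 1
    have hp0 := List.find?_some hfind
    simp only [beq_iff_eq] at hp0
    have hmem : p0 ∈ l := List.mem_of_find?_eq_some hfind
    have hlen1 : (l.filter (fun q => q.2 == p0.2)).length = 1 := by
      have h2 := hlen p0.2
      rw [List.length_map] at h2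
      omega
    obtain ⟨a, ha⟩ := List.length_eq_one_iff.mp hlen1
    have hpmem : p0 ∈ l.filter (fun q => q.2 == p0.2) := by
      rw [List.mem_filter]; exact ⟨hmem, by simp⟩
    rw [ha] at hpmem
    simp only [List.mem_singleton] at hpmem
    simp [Function.comp_def, freq_getD, ha, ← hpmem]

-- B's positional scan equals the same 'first key with unique value'
theorem findB_eq (vals : List String) :
    ∀ (l : List (String × String)) (pre : List String), vals = pre ++ l.map Prod.snd →
    findB vals (PySem.List.enumerate l (pre.length : Int))
    = (l.find? (fun kv => List.count kv.2 vals == 1)).map Prod.fst := by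
  intro l
  induction l with
  | nil => intro pre _; simp [PySem.List.enumerate_nil, findB]
  | cons kv rest ih =>
    intro pre hv
    rw [PySem.List.enumerate_cons, findB]
    have htake : PySem.List.slice vals none (some (pre.length : Int)) = pre := by
      rw [PySem.List.slice_to_natCast, hv]
      simp
    have hdrop : PySem.List.slice vals (some ((pre.length : Int) + 1)) none
        = rest.map Prod.snd := by
      have h1 : ((pre.length : Int) + 1) = ((pre.length + 1 : Nat) : Int) := by push_cast; ring
      rw [h1, PySem.List.slice_from_natCast, hv, List.map_cons]
      rw [show pre.length + 1 = (pre ++ [kv.2]).length by simp]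
      rw [show pre ++ kv.2 :: rest.map Prod.snd = (pre ++ [kv.2]) ++ rest.map Prod.snd by simp]
      simp
    have hcount : List.count kv.2 vals
        = List.count kv.2 pre + 1 + List.count kv.2 (rest.map Prod.snd) := by
      rw [hv, List.count_append, List.map_cons, List.count_cons_self]
      ring
    rw [htake, hdrop]
    by_cases hc : (List.count kv.2 vals == 1) = true
    · have hne : List.count kv.2 vals = 1 := by simpa using hc
      have hcp : List.count kv.2 pre = 0 := by omega
      have hcs : List.count kv.2 (rest.map Prod.snd) = 0 := by omega
      have hmp : pre.contains kv.2 = false := by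
        simp [List.count_eq_zero.mp hcp]
      have hms : (rest.map Prod.snd).contains kv.2 = false := by
        simp [List.count_eq_zero.mp hcs]
      rw [hmp, hms]
      simp [hc]
    · have hne : List.count kv.2 vals ≠ 1 := by simpa using hc
      have hcond2 : (!pre.contains kv.2 && !(rest.map Prod.snd).contains kv.2) = false := by
        cases hp : pre.contains kv.2 with
        | true => rfl
        | false =>
          have hcp : List.count kv.2 pre = 0 :=
            List.count_eq_zero.mpr (by simpa using hp)
          have hs : (rest.map Prod.snd).contains kv.2 = true := by
            by_contra hs'
            have hcs : List.count kv.2 (rest.map Prod.snd) = 0 :=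
              List.count_eq_zero.mpr (by simpa using hs')
            omega
          rw [hs]
          rfl
      rw [hcond2]
      have hcf : (List.count kv.2 vals == 1) = false := by simpa using hc
      have hpre' : vals = (pre ++ [kv.2]) ++ rest.map Prod.snd := by
        rw [hv]; simp
      have hl : ((pre ++ [kv.2]).length : Int) = (pre.length : Int) + 1 := by
        simp
      have hih := ih (pre ++ [kv.2]) hpre'
      rw [hl] at hih
      simpa [List.find?_cons, hcf] using hih

-- ===== VERDICT (by name: the statement is the Claim_ definition above) =====
theorem process_spec : Claim_equal_process := by
  intro entry _ _
  unfold Spec_process process process_alt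
  cases h : (PySem.Dict.ofList entry).get? "options" with
  | none => rfl
  | some opts =>
    simp only []
    rw [coreA (PySem.Dict.ofList opts).items]
    have hb := findB_eq ((PySem.Dict.ofList opts).items.map Prod.snd)
      (PySem.Dict.ofList opts).items [] (by simp)
    simpa using hb.symm
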